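-- pv_equiv track=rewrite | github.com/Chenjinyu/testbank | Microsoft_OA/17.maximumLengthOfAConcatenatedStringwithUniqueCharacters.py | maxLength2
-- ===== SOURCE A (Python) =====
-- from typing import List, Set
--
-- def maxLength2(arr: List[str]) -> int:
--     """
--     bit wise: eg: abc --> 0b000111
--                   efg --> 0b111000
--                 abc & efg = 00000000, abc | efg = 00111111
--                 so, abc & efg = 0, means there is not duplicate char.
--     """
--     if not arr: return 0
--
--     def get_state(w):
--         bit_state = 0
--         for c in w:
--             idx = ord(c) - ord('a')
--             # if bit_state & 1 << idx != 0:
--             #     return end_state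
--             bit_state |= 1 << idx
--         return bit_state
--
--     states = [get_state(w) for w in arr]
--
--     def recur(i, state):
--         if state & states[i] != 0:
--             return 0
--
--         state = state | states[i]
--         if i != len(arr) - 1:
--             max_value = max(recur(j, state) for j in range(i + 1, len(arr)))
--         else:
--             max_value = 0
--
--         return max_value + len(arr[i])
--
--     return max(recur(i, 0) for i in range(len(arr)))
-- ===== SOURCE B (Python) =====
-- def maxLength2(arr):
--     best = 0
--     combos = [(0, 0)]  # (char bitmask, total length) of every pairwise-disjoint-by-mask subset so far
--     for w in arr:
--         m = 0
--         for c in w: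
--             m |= 1 << (ord(c) - ord('a'))
--         new = []
--         for cm, cl in combos:
--             if cm & m == 0:
--                 t = cl + len(w)
--                 new.append((cm | m, t))
--                 if t > best:
--                     best = t
--         combos += new
--     return best
-- ===== Notes on version B (the rewrite author's own statement) =====
-- stated objective: faster
-- what changed: Replaces A's top-down recursion over start indices (which re-explores suffixes from every chain and pays per-call generator/recursion overhead) with an iterative subset-DP: one left-to-right pass extending a list of (mask, total-length) combos per word while tracking the running best.
import Mathlib
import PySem

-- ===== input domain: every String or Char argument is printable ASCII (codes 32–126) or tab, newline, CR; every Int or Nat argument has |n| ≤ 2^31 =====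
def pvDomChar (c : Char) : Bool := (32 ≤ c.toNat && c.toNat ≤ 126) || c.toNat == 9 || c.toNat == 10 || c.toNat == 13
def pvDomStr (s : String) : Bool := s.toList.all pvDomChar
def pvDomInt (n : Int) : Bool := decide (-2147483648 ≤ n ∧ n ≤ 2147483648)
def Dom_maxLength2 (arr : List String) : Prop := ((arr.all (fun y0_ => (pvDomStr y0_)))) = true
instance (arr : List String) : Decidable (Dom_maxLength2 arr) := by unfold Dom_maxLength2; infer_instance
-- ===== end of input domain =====

-- B replaces A's top-down recursion over start indices with an iterative subset-DP over
-- (mask, total-length) combos; same return values wherever A returns (alternative decomposition).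

-- ===== PORT A =====
-- ord(c) - ord('a') ported as Nat subtraction: exact for chars ≥ 'a' (all of Pre_);
-- for chars below 'a' the Python raises ValueError (negative shift), excluded by Pre_.
def getState (w : String) : Nat :=
  w.toList.foldl (fun st c => st ||| (1 <<< (c.toNat - 97))) 0

-- recur(i, state); fuel only for termination: every call has fuel ≥ len(arr) - i > 0.
def recurA (arr : List String) (states : List Nat) : Nat → Nat → Nat → Int
  | 0, _, _ => 0
  | fuel + 1, i, state =>
    if state &&& states.getD i 0 ≠ 0 then 0
    else
      let st := state ||| states.getD i 0
      let maxValue : Int :=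
        if i ≠ arr.length - 1 then
          (PySem.List.max? ((PySem.List.pyRange ((i : Int) + 1) arr.length 1).map
            (fun j => recurA arr states fuel j.toNat st)) (fun y => y)).getD 0
        else 0
      maxValue + ((arr.getD i "").toList.length : Int)

def maxLength2 (arr : List String) : Int :=
  if arr = [] then 0
  else
    let states := arr.map getState
    (PySem.List.max? ((PySem.List.pyRange 0 arr.length 1).map
      (fun i => recurA arr states arr.length i.toNat 0)) (fun y => y)).getD 0

-- ===== PORT B =====
def maskB (w : String) : Nat :=
  w.toList.foldl (fun m c => m ||| (1 <<< (c.toNat - 97))) 0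

def stepB (st : List (Nat × Int) × Int) (w : String) : List (Nat × Int) × Int :=
  let m := maskB w
  let l : Int := w.toList.length
  let inner := st.1.foldl
    (fun (acc : List (Nat × Int) × Int) (c : Nat × Int) =>
      if c.1 &&& m = 0 then
        (acc.1 ++ [(c.1 ||| m, c.2 + l)], if c.2 + l > acc.2 then c.2 + l else acc.2)
      else acc) ([], st.2)
  (st.1 ++ inner.1, inner.2)

def maxLength2_alt (arr : List String) : Int :=
  (arr.foldl stepB ([(0, 0)], 0)).2

-- ===== PRECONDITION & SPEC =====
-- Pre_ excludes exactly the inputs containing a character below 'a' (ord < 97): there the Python A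
-- raises ValueError ("negative shift count") — and the Python B raises identically.
def Pre_maxLength2 (arr : List String) : Prop :=
  (arr.all (fun w => w.toList.all (fun c => 97 ≤ c.toNat))) = true

instance (arr : List String) : Decidable (Pre_maxLength2 arr) := by
  unfold Pre_maxLength2; infer_instance

def pvWitness_maxLength2 : List String := ["ab", "cd", "ab{"]

def Spec_maxLength2 (arr : List String) (out : Int) : Prop := out = maxLength2_alt arr
instance (arr : List String) (out : Int) : Decidable (Spec_maxLength2 arr out) := by unfold Spec_maxLength2; infer_instance

-- ===== CLAIM (what is proved, stated in full; the proofs are below) =====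
def Claim_equal_maxLength2 : Prop := ∀ (arr : List String), Dom_maxLength2 arr → Pre_maxLength2 arr → Spec_maxLength2 arr (maxLength2 arr)

-- ===== LEMMAS AND PROOFS =====

-- Reference function both ports are reduced to: best total length over an in-order subset of the
-- (mask, length) pairs whose masks are pairwise disjoint and disjoint from accumulated state s.
def bestSpec : List (Nat × Int) → Nat → Int
  | [], _ => 0
  | (m, l) :: rest, s =>
    if s &&& m = 0 then max (bestSpec rest s) (l + bestSpec rest (s ||| m))
    else bestSpec rest s

def pairsOf (arr : List String) : List (Nat × Int) :=
  arr.map (fun w => (getState w, (w.toList.length : Int)))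

theorem bestSpec_nonneg (ps : List (Nat × Int)) (s : Nat)
    (h : ∀ p ∈ ps, 0 ≤ p.2) : 0 ≤ bestSpec ps s := by
  induction ps generalizing s with
  | nil => simp [bestSpec]
  | cons p rest ih =>
    obtain ⟨m, l⟩ := p
    have hr : ∀ q ∈ rest, 0 ≤ q.2 := fun q hq => h q (by simp [hq])
    simp only [bestSpec]
    split_ifs
    · exact le_trans (ih s hr) (le_max_left _ _)
    · exact ih s hr

theorem pairsOf_nonneg (arr : List String) : ∀ p ∈ pairsOf arr, 0 ≤ p.2 := by
  intro p hp
  simp only [pairsOf, List.mem_map] at hp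
  obtain ⟨w, _, rfl⟩ := hp
  exact Int.natCast_nonneg _

theorem bestSpec_pairs_nonneg (arr : List String) (k : Nat) (s : Nat) :
    0 ≤ bestSpec ((pairsOf arr).drop k) s :=
  bestSpec_nonneg _ _ (fun p hp => pairsOf_nonneg arr p (List.mem_of_mem_drop hp))

theorem pairsOf_length (arr : List String) : (pairsOf arr).length = arr.length := by
  simp [pairsOf]

theorem pairsOf_drop_cons (arr : List String) (k : Nat) (hk : k < arr.length) :
    (pairsOf arr).drop k =
      (getState (arr.getD k ""), ((arr.getD k "").toList.length : Int)) :: (pairsOf arr).drop (k + 1) := by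
  have hk' : k < (pairsOf arr).length := by rw [pairsOf_length]; exact hk
  rw [List.drop_eq_getElem_cons hk']
  congr 1
  simp [pairsOf, hk, List.getD]

theorem foldl_max_extract (L : List Int) (a b : Int) :
    L.foldl max (max a b) = max a (L.foldl max b) := by
  induction L generalizing b with
  | nil => rfl
  | cons x t ih => simp only [List.foldl_cons, max_assoc, ih]

-- closed form of recur(j, s) for j in [k, n)
def closedVal (arr : List String) (s' : Nat) (j : Nat) : Int :=
  if s' &&& getState (arr.getD j "") ≠ 0 then 0
  else ((arr.getD j "").toList.length : Int) +
       bestSpec ((pairsOf arr).drop (j + 1)) (s' ||| getState (arr.getD j ""))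

-- Python's max(recur(j, s) for j in range(k, n)) equals bestSpec of the k-suffix.
theorem maxRange_eq (arr : List String) (f : Int → Int) (s' : Nat) (k : Nat)
    (hk : k < arr.length)
    (hf : ∀ j : Nat, k ≤ j → j < arr.length → f (j : Int) = closedVal arr s' j) :
    (PySem.List.max? ((PySem.List.pyRange (k : Int) arr.length 1).map f) (fun y => y)).getD 0
      = bestSpec ((pairsOf arr).drop k) s' := by
  induction hd : arr.length - k using Nat.strong_induction_on generalizing k with
  | _ d ihd =>
  have hcons : PySem.List.pyRange (k : Int) arr.length 1 =
      (k : Int) :: PySem.List.pyRange ((k : Int) + 1) arr.length 1 :=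
    PySem.List.pyRange_one_cons (by exact_mod_cast hk)
  rw [pairsOf_drop_cons arr k hk]
  by_cases hend : k + 1 = arr.length
  · have hnil : PySem.List.pyRange ((k : Int) + 1) arr.length 1 = [] :=
      PySem.List.pyRange_one_eq_nil (by omega)
    have hdropnil : (pairsOf arr).drop (k + 1) = [] :=
      List.drop_eq_nil_of_le (by rw [pairsOf_length]; omega)
    rw [hcons, hnil]
    simp only [List.map_cons, List.map_nil, PySem.List.max?_id_cons, List.foldl_nil,
      Option.getD_some]
    rw [hf k le_rfl hk]
    simp only [closedVal, hdropnil]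
    have hb : ∀ s'' : Nat, bestSpec [] s'' = 0 := fun _ => rfl
    simp only [bestSpec, Int.add_zero]
    by_cases hcc : s' &&& getState (arr.getD k "") = 0
    · rw [if_neg (by simpa using hcc : ¬ s' &&& getState (arr.getD k "") ≠ 0), if_pos hcc]
      exact (max_eq_right (Int.natCast_nonneg _)).symm
    · rw [if_pos (by simpa using hcc : s' &&& getState (arr.getD k "") ≠ 0), if_neg hcc]
  · have hk2 : k + 1 < arr.length := by omega
    have hcast1 : ((k : Int) + 1) = ((k + 1 : Nat) : Int) := by push_cast; ring
    have hcons2 : PySem.List.pyRange ((k : Int) + 1) arr.length 1 =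
        ((k : Int) + 1) :: PySem.List.pyRange (((k : Int) + 1) + 1) arr.length 1 := by
      rw [hcast1]
      exact PySem.List.pyRange_one_cons (by exact_mod_cast hk2)
    have htail := ihd (arr.length - (k + 1)) (by omega) (k + 1) hk2
      (fun j hj1 hj2 => hf j (by omega) hj2) rfl
    rw [← hcast1] at htail
    rw [hcons2] at htail
    simp only [List.map_cons, PySem.List.max?_id_cons, Option.getD_some] at htail
    rw [hcons, hcons2]
    simp only [List.map_cons, PySem.List.max?_id_cons, Option.getD_some]
    rw [List.foldl_cons, foldl_max_extract, htail, hf k le_rfl hk]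
    by_cases hcc : s' &&& getState (arr.getD k "") = 0
    · simp only [closedVal, bestSpec, if_neg (by simpa using hcc : ¬ s' &&& getState (arr.getD k "") ≠ 0), if_pos hcc]
      exact max_comm _ _
    · simp only [closedVal, bestSpec, if_pos (by simpa using hcc : s' &&& getState (arr.getD k "") ≠ 0), if_neg hcc]
      exact max_eq_right (bestSpec_pairs_nonneg arr (k + 1) s')

-- Main A-side lemma: recur(i, s) equals its closed form, given enough fuel.
theorem recurA_eq (arr : List String) (fuel : Nat) :
    ∀ i s, i < arr.length → arr.length - i ≤ fuel →
      recurA arr (arr.map getState) fuel i s = closedVal arr s i := by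
  induction fuel with
  | zero => intro i s hi hf; omega
  | succ fuel ih =>
    intro i s hi hf
    have hst : (arr.map getState).getD i 0 = getState (arr.getD i "") := by
      rw [List.getD_eq_getElem _ _ (by simpa using hi), List.getElem_map,
          List.getD_eq_getElem _ _ hi]
    by_cases hc : s &&& getState (arr.getD i "") = 0
    · by_cases hlast : i = arr.length - 1
      · have hdrop : (pairsOf arr).drop (i + 1) = [] :=
          List.drop_eq_nil_of_le (by rw [pairsOf_length]; omega)
        simp only [recurA, hst, closedVal, hdrop,
          if_neg (by simpa using hc : ¬ s &&& getState (arr.getD i "") ≠ 0),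
          if_neg (by simpa using hlast : ¬ i ≠ arr.length - 1), bestSpec]
        omega
      · simp only [recurA, hst, closedVal,
          if_neg (by simpa using hc : ¬ s &&& getState (arr.getD i "") ≠ 0),
          if_pos (by simpa using hlast : i ≠ arr.length - 1)]
        rw [Int.add_comm]
        congr 1
        rw [show ((i : Int) + 1) = ((i + 1 : Nat) : Int) from by push_cast; ring]
        exact maxRange_eq arr _ _ (i + 1) (by omega)
          (fun j hj1 hj2 => by simpa using ih j _ hj2 (by omega))
    · simp only [recurA]
      rw [hst, if_pos (by simpa using hc : s &&& getState (arr.getD i "") ≠ 0)]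
      simp only [closedVal]
      rw [if_pos (by simpa using hc : s &&& getState (arr.getD i "") ≠ 0)]

-- A's top level equals bestSpec of the whole list.
theorem maxLength2_eq_bestSpec (arr : List String) :
    maxLength2 arr = bestSpec (pairsOf arr) 0 := by
  by_cases harr : arr = []
  · subst harr; rfl
  · have hlen : 0 < arr.length := List.length_pos_iff.mpr harr
    simp only [maxLength2, if_neg harr]
    have h0 := maxRange_eq arr
      (fun i => recurA arr (arr.map getState) arr.length i.toNat 0) 0 0 hlen
      (fun j hj1 hj2 => by
        simpa using recurA_eq arr arr.length j 0 hj2 (by omega))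
    simpa using h0

-- ==== B side ====

-- value the answer can still reach from combos C, best b, with rest of the words to come
def potential (rest : List (Nat × Int)) (C : List (Nat × Int)) (b : Int) : Int :=
  C.foldl (fun a c => max a (c.2 + bestSpec rest c.1)) b

-- running best after scanning C for word (m, l)
def bumped (m : Nat) (l : Int) (C : List (Nat × Int)) (b : Int) : Int :=
  C.foldl (fun a c => if c.1 &&& m = 0 then (if c.2 + l > a then c.2 + l else a) else a) b

def newOf (m : Nat) (l : Int) (C : List (Nat × Int)) : List (Nat × Int) :=
  (C.filter (fun c => c.1 &&& m = 0)).map (fun c => (c.1 ||| m, c.2 + l))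

theorem if_gt_eq_max (a x : Int) : (if x > a then x else a) = max a x := by
  split_ifs with h
  · exact (max_eq_right h.le).symm
  · exact (max_eq_left (not_lt.mp h)).symm

theorem pot_cons (rest : List (Nat × Int)) (c : Nat × Int) (C : List (Nat × Int)) (i : Int) :
    potential rest (c :: C) i = potential rest C (max i (c.2 + bestSpec rest c.1)) := rfl

theorem pot_middle (rest X Y : List (Nat × Int)) (y : Nat × Int) (i : Int) :
    potential rest (X ++ y :: Y) i = potential rest (X ++ Y) (max i (y.2 + bestSpec rest y.1)) := by
  induction X generalizing i with
  | nil => rfl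
  | cons x X' ih =>
    rw [List.cons_append, pot_cons, ih, List.cons_append, pot_cons, max_right_comm]

theorem bumped_cons (m : Nat) (l : Int) (c : Nat × Int) (C : List (Nat × Int)) (b : Int) :
    bumped m l (c :: C) b = bumped m l C (if c.1 &&& m = 0 then max b (c.2 + l) else b) := by
  simp only [bumped, List.foldl_cons]
  by_cases h : c.1 &&& m = 0
  · rw [if_pos h, if_pos h, if_gt_eq_max]
  · rw [if_neg h, if_neg h]

theorem bumped_extract (m : Nat) (l : Int) (C : List (Nat × Int)) (a b : Int) :
    bumped m l C (max a b) = max a (bumped m l C b) := by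
  induction C generalizing b with
  | nil => rfl
  | cons c C' ih =>
    rw [bumped_cons, bumped_cons]
    by_cases h : c.1 &&& m = 0
    · rw [if_pos h, if_pos h, max_assoc, ih]
    · rw [if_neg h, if_neg h, ih]

theorem bumped_ge (m : Nat) (l : Int) (C : List (Nat × Int)) (b : Int) :
    b ≤ bumped m l C b := by
  induction C generalizing b with
  | nil => exact le_rfl
  | cons c C' ih =>
    rw [bumped_cons]
    by_cases h : c.1 &&& m = 0
    · rw [if_pos h]; exact le_trans (le_max_left _ _) (ih _)
    · rw [if_neg h]; exact ih b

theorem bumped_mem (m : Nat) (l : Int) (C : List (Nat × Int)) (b : Int)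
    (c : Nat × Int) (hc : c ∈ C) (hcompat : c.1 &&& m = 0) :
    c.2 + l ≤ bumped m l C b := by
  induction C generalizing b with
  | nil => cases hc
  | cons d C' ih =>
    rw [bumped_cons]
    rcases List.mem_cons.mp hc with rfl | hmem
    · rw [if_pos hcompat]
      exact le_trans (le_max_right _ _) (bumped_ge m l C' _)
    · exact ih _ hmem

-- characterise the inner scan of stepB
theorem innerB_char (m : Nat) (l : Int) (C : List (Nat × Int)) :
    ∀ (acc : List (Nat × Int)) (b : Int),
    C.foldl (fun (acc : List (Nat × Int) × Int) (c : Nat × Int) =>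
      if c.1 &&& m = 0 then
        (acc.1 ++ [(c.1 ||| m, c.2 + l)], if c.2 + l > acc.2 then c.2 + l else acc.2)
      else acc) (acc, b) = (acc ++ newOf m l C, bumped m l C b) := by
  induction C with
  | nil => intro acc b; simp [newOf, bumped]
  | cons c C' ih =>
    intro acc b
    rw [List.foldl_cons, bumped_cons]
    by_cases h1 : c.1 &&& m = 0
    · rw [if_pos h1, if_pos h1]
      rw [ih (acc ++ [(c.1 ||| m, c.2 + l)]) (if c.2 + l > b then c.2 + l else b)]
      rw [if_gt_eq_max]
      simp [newOf, h1]
    · rw [if_neg h1, if_neg h1, ih acc b]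
      simp [newOf, h1]

theorem max_shuffle (u v w x2 : Int) (h : u ≤ w) :
    max (max (max u x2) v) w = max v (max w x2) := by
  apply le_antisymm <;> simp only [max_le_iff, le_max_iff] <;> omega

-- The key step lemma: processing one word preserves the potential.
theorem step_pot (m : Nat) (l : Int) (rest : List (Nat × Int))
    (hnn : ∀ s, 0 ≤ bestSpec rest s) :
    ∀ (C : List (Nat × Int)) (b : Int),
    potential rest (C ++ newOf m l C) (bumped m l C b) = potential ((m, l) :: rest) C b := by
  intro C
  induction C with
  | nil => intro b; simp [newOf, bumped, potential]
  | cons c C' ih =>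
    intro b
    obtain ⟨mc, t⟩ := c
    set B1 := bestSpec rest mc with hB1
    set B2 := bestSpec rest (mc ||| m) with hB2
    by_cases h1 : mc &&& m = 0
    · -- compatible head
      have hnew : newOf m l ((mc, t) :: C') = (mc ||| m, t + l) :: newOf m l C' := by
        simp [newOf, h1]
      have hbump : bumped m l ((mc, t) :: C') b = bumped m l C' (max b (t + l)) := by
        rw [bumped_cons, if_pos h1]
      have hx : bumped m l C' (max b (t + l)) = max (t + l) (bumped m l C' b) := by
        rw [max_comm, bumped_extract]
      have hy : bumped m l C' (max b (max (t + B1) (t + l + B2))) =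
          max (t + B1) (max (t + l + B2) (bumped m l C' b)) := by
        rw [show max b (max (t + B1) (t + l + B2)) = max (t + B1) (max (t + l + B2) b) from by
              rw [max_comm, max_assoc],
            bumped_extract, bumped_extract]
      rw [hnew, hbump, List.cons_append, pot_cons, pot_middle]
      show potential rest (C' ++ newOf m l C')
          (max (max (bumped m l C' (max b (t + l))) (t + B1)) (t + l + B2)) = _
      rw [hx, max_shuffle (t + l) (t + B1) (t + l + B2) (bumped m l C' b) (by have := hnn (mc ||| m); omega)]
      rw [← hy, ih]
      rw [pot_cons ((m, l) :: rest) (mc, t) C' b]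
      congr 1
      show max b (max (t + B1) (t + l + B2)) = max b (t + bestSpec ((m, l) :: rest) mc)
      have hbs : bestSpec ((m, l) :: rest) mc = max B1 (l + B2) := by
        simp only [bestSpec, if_pos h1]
        rw [max_comm]
      rw [hbs]
      congr 1
      rw [← max_add_add_left t B1 (l + B2)]
      congr 1
      ring
    · -- incompatible head
      have hnew : newOf m l ((mc, t) :: C') = newOf m l C' := by simp [newOf, h1]
      have hbump : bumped m l ((mc, t) :: C') b = bumped m l C' b := by
        rw [bumped_cons, if_neg h1]
      rw [hnew, hbump, List.cons_append, pot_cons]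
      show potential rest (C' ++ newOf m l C') (max (bumped m l C' b) (t + B1)) = _
      rw [max_comm, ← bumped_extract, ← max_comm b (t + B1), ih]
      rw [pot_cons ((m, l) :: rest) (mc, t) C' b]
      have hbs : bestSpec ((m, l) :: rest) (mc, t).1 = B1 := by
        simp only [bestSpec, if_neg h1]
        exact hB1.symm
      rw [hbs]

theorem pot_absorb (rest : List (Nat × Int)) (C : List (Nat × Int)) (b : Int)
    (h : ∀ c ∈ C, c.2 + bestSpec rest c.1 ≤ b) : potential rest C b = b := by
  induction C generalizing b with
  | nil => rfl
  | cons c C' ih =>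
    rw [pot_cons, max_eq_left (h c (by simp))]
    exact ih _ (fun d hd => h d (by simp [hd]))

theorem outer_fold (ws : List String) :
    ∀ (C : List (Nat × Int)) (b : Int), (∀ c ∈ C, c.2 ≤ b) →
    (ws.foldl stepB (C, b)).2 = potential (pairsOf ws) C b := by
  induction ws with
  | nil =>
    intro C b hle
    rw [List.foldl_nil]
    show b = potential (pairsOf []) C b
    exact (pot_absorb _ C b (fun c hc => by simpa [pairsOf, bestSpec] using hle c hc)).symm
  | cons w ws' ih =>
    intro C b hle
    have hstep : stepB (C, b) w = (C ++ newOf (maskB w) (w.toList.length : Int) C,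
        bumped (maskB w) (w.toList.length : Int) C b) := by
      simp only [stepB]
      rw [innerB_char]
      simp
    rw [List.foldl_cons, hstep]
    set m := maskB w with hm
    set l : Int := (w.toList.length : Int) with hl
    have hle' : ∀ c ∈ C ++ newOf m l C, c.2 ≤ bumped m l C b := by
      intro c hc
      rcases List.mem_append.mp hc with hc | hc
      · exact le_trans (hle c hc) (bumped_ge m l C b)
      · simp only [newOf, List.mem_map, List.mem_filter] at hc
        obtain ⟨d, ⟨hd, hdc⟩, rfl⟩ := hc
        exact bumped_mem m l C b d hd (by simpa using hdc)
    rw [ih _ _ hle']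
    have hpw : pairsOf (w :: ws') = (m, l) :: pairsOf ws' := by
      simp [pairsOf, hm, hl, maskB, getState]
    rw [hpw]
    exact step_pot m l (pairsOf ws')
      (fun s => bestSpec_nonneg _ _ (pairsOf_nonneg ws')) C b

theorem maxLength2_alt_eq_bestSpec (arr : List String) :
    maxLength2_alt arr = bestSpec (pairsOf arr) 0 := by
  show (arr.foldl stepB ([(0, 0)], 0)).2 = _
  rw [outer_fold arr [(0, 0)] 0 (by intro c hc; simp at hc; simp [hc])]
  have h1 : potential (pairsOf arr) [(0, 0)] 0 = max 0 (0 + bestSpec (pairsOf arr) 0) := rfl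
  rw [h1, Int.zero_add]
  exact max_eq_right (bestSpec_nonneg _ _ (pairsOf_nonneg arr))

-- ===== VERDICT (by name: the statement is the Claim_ definition above) =====
theorem maxLength2_spec : Claim_equal_maxLength2 := by
  intro arr _ _
  unfold Spec_maxLength2
  rw [maxLength2_eq_bestSpec, maxLength2_alt_eq_bestSpec]
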